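-- pv_equiv track=rewrite | github.com/karthikpappu/pyc_source | pycfiles/gentex-0.1.2-py3.7-linux-x86_64/sphere.cpython-37.py | get_radii
-- ===== SOURCE A (Python) =====
-- def bres_circle(xm, ym, r):
--     circ = []
--     x = -r
--     y = 0
--     err = 2 - 2 * r
--     while x < 0:
--         circ.append([xm - x, ym + y])
--         circ.append([xm - y, ym - x])
--         circ.append([xm + x, ym - y])
--         circ.append([xm + y, ym + x])
--         r = err
--         if r > x:
--             x += 1
--             err += x * 2 + 1
--         if r <= y:
--             y += 1
--             err += y * 2 + 1
--
--     return circ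
--
-- def get_radii(r):
--     zero_circle = bres_circle(0, 0, r)
--     radii = []
--     if r > 1:
--         for step in range(r + 1):
--             for zc in zero_circle:
--                 if zc[0] == step and zc[1] > 0:
--                     radii.append(zc[1])
--
--     else:
--         radii = [
--          1, 0]
--     return radii
-- ===== SOURCE B (Python) =====
-- def get_radii(r):
--     if r <= 1:
--         return [1, 0]
--     # One Bresenham pass: bucket positive-y circle points by x instead of
--     # rescanning the whole point list for every step.
--     buckets = {}
--     x = -r
--     y = 0
--     err = 2 - 2 * r
--     while x < 0:
--         for px, py in ((-x, y), (-y, -x), (x, -y), (y, x)):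
--             if py > 0:
--                 buckets.setdefault(px, []).append(py)
--         e = err
--         if e > x:
--             x += 1
--             err += x * 2 + 1
--         if e <= y:
--             y += 1
--             err += y * 2 + 1
--     out = []
--     for step in range(r + 1):
--         out.extend(buckets.get(step, ()))
--     return out
-- ===== Notes on version B (the rewrite author's own statement) =====
-- stated objective: faster
-- what changed: Instead of rescanning the whole Bresenham point list once per x-step (r+1 nested scans), B makes one Bresenham pass that buckets positive-y points into a dict keyed by x and then concatenates the buckets for steps 0..r.
import Mathlib
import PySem

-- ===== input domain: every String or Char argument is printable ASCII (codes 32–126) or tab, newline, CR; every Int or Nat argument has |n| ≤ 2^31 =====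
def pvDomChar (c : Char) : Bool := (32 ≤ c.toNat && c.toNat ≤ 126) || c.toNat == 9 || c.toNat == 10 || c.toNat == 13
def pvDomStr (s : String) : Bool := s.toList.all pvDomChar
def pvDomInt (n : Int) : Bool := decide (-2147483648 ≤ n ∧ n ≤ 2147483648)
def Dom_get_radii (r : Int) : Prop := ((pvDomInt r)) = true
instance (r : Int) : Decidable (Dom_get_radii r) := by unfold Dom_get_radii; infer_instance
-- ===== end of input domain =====

-- B replaces A's per-step rescan of the whole circle-point list by a single pass
-- that buckets the positive-y points in a dict keyed by x (objective: faster).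

-- ===== PORT A =====
-- A's two-element point lists [px, py] are ported as pairs (px, py); the while
-- loop is ported as fuel recursion (the fuel only makes the recursion total:
-- the loop increments x or y each iteration, so 4*r+8 iterations always suffice).
def bres_circle_loop (fuel : Nat) (xm ym : Int) (circ : List (Int × Int))
    (x y err : Int) : List (Int × Int) :=
  match fuel with
  | 0 => circ
  | fuel + 1 =>
    if x < 0 then
      let circ' := circ ++ [(xm - x, ym + y), (xm - y, ym - x), (xm + x, ym - y), (xm + y, ym + x)]
      let r' := err
      let x' := if r' > x then x + 1 else x
      let err' := if r' > x then err + x' * 2 + 1 else err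
      let y' := if r' ≤ y then y + 1 else y
      let err'' := if r' ≤ y then err' + y' * 2 + 1 else err'
      bres_circle_loop fuel xm ym circ' x' y' err''
    else circ

def bres_circle (xm ym r : Int) : List (Int × Int) :=
  bres_circle_loop (4 * r.toNat + 8) xm ym [] (-r) 0 (2 - 2 * r)

def get_radii (r : Int) : List Int :=
  let zero_circle := bres_circle 0 0 r
  if r > 1 then
    (PySem.List.pyRange 0 (r + 1) 1).foldl (fun radii step =>
      zero_circle.foldl (fun radii zc =>
        if zc.1 = step ∧ zc.2 > 0 then radii ++ [zc.2] else radii) radii) []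
  else [1, 0]

-- ===== PORT B =====
-- buckets.setdefault(px, []).append(py)
def bucket_add (d : PySem.Dict Int (List Int)) (p : Int × Int) : PySem.Dict Int (List Int) :=
  if p.2 > 0 then d.modify p.1 [] (· ++ [p.2]) else d

-- B's while loop: same Bresenham state machine, but folding each quadruple of
-- symmetric points straight into the buckets dict (same fuel guard as A's port).
def radii_buckets_loop (fuel : Nat) (d : PySem.Dict Int (List Int))
    (x y err : Int) : PySem.Dict Int (List Int) :=
  match fuel with
  | 0 => d
  | fuel + 1 =>
    if x < 0 then
      let d' := [(-x, y), (-y, -x), (x, -y), (y, x)].foldl bucket_add d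
      let e := err
      let x' := if e > x then x + 1 else x
      let err' := if e > x then err + x' * 2 + 1 else err
      let y' := if e ≤ y then y + 1 else y
      let err'' := if e ≤ y then err' + y' * 2 + 1 else err'
      radii_buckets_loop fuel d' x' y' err''
    else d

def get_radii_alt (r : Int) : List Int :=
  if r ≤ 1 then [1, 0]
  else
    let buckets := radii_buckets_loop (4 * r.toNat + 8) PySem.Dict.empty (-r) 0 (2 - 2 * r)
    (PySem.List.pyRange 0 (r + 1) 1).foldl (fun out step => out ++ buckets.getD step []) []

-- ===== PRECONDITION & SPEC =====
def Spec_get_radii (r : Int) (out : List Int) : Prop := out = get_radii_alt r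
instance (r : Int) (out : List Int) : Decidable (Spec_get_radii r out) := by unfold Spec_get_radii; infer_instance

-- ===== CLAIM (what is proved, stated in full; the proofs are below) =====
def Claim_equal_get_radii : Prop := ∀ (r : Int), Dom_get_radii r → Spec_get_radii r (get_radii r)

-- ===== LEMMAS AND PROOFS =====

-- A's loop appends to its accumulator
theorem bres_circle_loop_acc (fuel : Nat) (xm ym : Int) :
    ∀ (x y err : Int) (circ : List (Int × Int)),
      bres_circle_loop fuel xm ym circ x y err =
        circ ++ bres_circle_loop fuel xm ym [] x y err := by
  induction fuel with
  | zero => intro x y err circ; simp [bres_circle_loop]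
  | succ fuel ih =>
    intro x y err circ
    by_cases hx : x < 0
    · simp only [bres_circle_loop, if_pos hx]
      rw [ih, ih _ _ _ ([] ++ _)]
      simp
    · simp [bres_circle_loop, hx]

-- B's bucket loop is the fold of bucket_add over A's point list (at the origin)
theorem radii_buckets_loop_eq (fuel : Nat) :
    ∀ (x y err : Int) (d : PySem.Dict Int (List Int)),
      radii_buckets_loop fuel d x y err =
        (bres_circle_loop fuel 0 0 [] x y err).foldl bucket_add d := by
  induction fuel with
  | zero => intro x y err d; simp [radii_buckets_loop, bres_circle_loop]
  | succ fuel ih =>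
    intro x y err d
    by_cases hx : x < 0
    · simp only [radii_buckets_loop, bres_circle_loop, if_pos hx]
      rw [bres_circle_loop_acc, List.foldl_append, ih]
      simp
    · simp [radii_buckets_loop, bres_circle_loop, hx]

-- lookup in the fold of bucket_add = filter-and-project of the point list
theorem getD_foldl_bucket_add (step : Int) :
    ∀ (pts : List (Int × Int)) (d : PySem.Dict Int (List Int)),
      (pts.foldl bucket_add d).getD step [] =
        d.getD step [] ++ (pts.filter (fun p => decide (p.1 = step ∧ p.2 > 0))).map (·.2) := by
  intro pts
  induction pts with
  | nil => intro d; simp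
  | cons p pts ih =>
    intro d
    simp only [List.foldl_cons, List.filter_cons, ih]
    by_cases hpos : p.2 > 0
    · by_cases hk : p.1 = step
      · simp [bucket_add, hpos, hk, PySem.Dict.getD_modify_self]
      · simp [bucket_add, hpos, hk,
          PySem.Dict.getD_modify_of_ne d ([] : List Int) (· ++ [p.2]) (Ne.symm hk)]
    · simp [bucket_add, hpos]

-- ===== VERDICT (by name: the statement is the Claim_ definition above) =====
theorem get_radii_spec : Claim_equal_get_radii := by
  intro r _
  unfold Spec_get_radii
  by_cases hr : r > 1
  · have h2 : ¬ r ≤ 1 := by omega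
    show get_radii r = get_radii_alt r
    rw [get_radii, get_radii_alt]
    simp only [if_pos hr, if_neg h2, bres_circle]
    refine PySem.List.foldl_congr_mem _ _ _ _ ?_
    intro acc step _
    have ha := PySem.List.foldl_append_if
      (fun p : Int × Int => decide (p.1 = step ∧ p.2 > 0)) (fun p => p.2)
      (bres_circle_loop (4 * r.toNat + 8) 0 0 [] (-r) 0 (2 - 2 * r)) acc
    simp only [decide_eq_true_eq] at ha
    rw [ha, radii_buckets_loop_eq, getD_foldl_bucket_add]
    simp [pysem]
  · simp [get_radii, get_radii_alt, hr, show r ≤ 1 by omega]
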